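-- pv_equiv track=rewrite | github.com/hasnainrazaa03/Project-Vimaan | ML/core/postprocessor.py | add_implicit_state
-- ===== SOURCE A (Python) =====
-- ACTION_STATE_MAP = {
--     'raise': 'up',
--     'lower': 'down',
--     'retract': 'up',
--     'extend': 'down',
--     'stow': 'up',
--
--     'engage': 'on',
--     'disengage': 'off',
--     'turn on': 'on',
--     'turn off': 'off',
--     'start': 'on',
--     'stop': 'off',
--     'shut': 'off',
--     'activate': 'on',
--     'deactivate': 'off',
-- }
--
-- IMPLICIT_STATE_INTENTS = {
--     'toggle_landing_gear': True,
--     'toggle_flaps': True,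
--     'toggle_autopilot_1': True,
--     'toggle_autopilot_2': True,
--     'toggle_autopilot_3': True,
--     'toggle_engine_1': True,
--     'toggle_engine_2': True,
--     'toggle_engine_3': True,
--     'toggle_engine_4': True,
--     'toggle_parking_brake': True,
-- }
--
-- def add_implicit_state(slots, original_text, intent):
--     if intent not in IMPLICIT_STATE_INTENTS:
--         return slots
--
--     if 'state' in slots and slots['state']:
--         return slots
--
--     text_lower = original_text.lower()
--
--     for action, state_value in sorted(ACTION_STATE_MAP.items(), key=lambda x: len(x[0]), reverse=True):
--         if action in text_lower:
--             slots['state'] = state_value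
--             return slots
--
--     return slots
-- ===== SOURCE B (Python) =====
-- ACTION_STATE_MAP = {
--     'raise': 'up',
--     'lower': 'down',
--     'retract': 'up',
--     'extend': 'down',
--     'stow': 'up',
--
--     'engage': 'on',
--     'disengage': 'off',
--     'turn on': 'on',
--     'turn off': 'off',
--     'start': 'on',
--     'stop': 'off',
--     'shut': 'off',
--     'activate': 'on',
--     'deactivate': 'off',
-- }
--
-- IMPLICIT_STATE_INTENTS = {
--     'toggle_landing_gear': True,
--     'toggle_flaps': True,
--     'toggle_autopilot_1': True,
--     'toggle_autopilot_2': True,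
--     'toggle_autopilot_3': True,
--     'toggle_engine_1': True,
--     'toggle_engine_2': True,
--     'toggle_engine_3': True,
--     'toggle_engine_4': True,
--     'toggle_parking_brake': True,
-- }
--
-- def add_implicit_state(slots, original_text, intent):
--     # staged: filter matching actions once, then pick the longest (first wins ties)
--     if IMPLICIT_STATE_INTENTS.get(intent) and not slots.get('state'):
--         text_lower = original_text.lower()
--         hits = [(a, s) for a, s in ACTION_STATE_MAP.items() if a in text_lower]
--         if hits:
--             slots['state'] = max(hits, key=lambda h: len(h[0]))[1]
--     return slots
-- ===== Notes on version B (the rewrite author's own statement) =====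
-- stated objective: alternative
-- what changed: Replaces A's early-return chain and sort-by-length-then-first-substring-hit scan with one guarded block that filters the map once into the list of matching actions and then takes max by key length (Python max's first-maximal tie-break reproduces the stable descending sort).
import Mathlib
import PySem

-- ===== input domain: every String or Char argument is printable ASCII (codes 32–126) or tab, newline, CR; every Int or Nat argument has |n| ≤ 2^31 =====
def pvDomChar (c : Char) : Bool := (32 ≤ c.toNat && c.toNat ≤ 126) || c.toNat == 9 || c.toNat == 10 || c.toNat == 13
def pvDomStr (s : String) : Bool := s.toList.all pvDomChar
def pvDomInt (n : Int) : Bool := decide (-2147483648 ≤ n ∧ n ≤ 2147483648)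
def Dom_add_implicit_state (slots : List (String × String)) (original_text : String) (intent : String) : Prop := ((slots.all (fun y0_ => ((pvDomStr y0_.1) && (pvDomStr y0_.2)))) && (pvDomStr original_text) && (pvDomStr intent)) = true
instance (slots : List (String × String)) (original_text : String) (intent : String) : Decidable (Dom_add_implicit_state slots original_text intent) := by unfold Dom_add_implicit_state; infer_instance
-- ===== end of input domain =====

-- B replaces A's early-return chain and sort-then-first-hit scan with one guarded block:
-- filter the map once, then max by key length (objective: alternative decomposition, no sort).
-- A mutates `slots` in place (so does B identically); the equivalence proved is about the return value.

-- shared module constants (ACTION_STATE_MAP and IMPLICIT_STATE_INTENTS, insertion order)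
def pvActionMap : List (String × String) :=
  [("raise", "up"), ("lower", "down"), ("retract", "up"), ("extend", "down"), ("stow", "up"),
   ("engage", "on"), ("disengage", "off"), ("turn on", "on"), ("turn off", "off"),
   ("start", "on"), ("stop", "off"), ("shut", "off"), ("activate", "on"), ("deactivate", "off")]

def pvIntentMap : List (String × Bool) :=
  [("toggle_landing_gear", true), ("toggle_flaps", true), ("toggle_autopilot_1", true),
   ("toggle_autopilot_2", true), ("toggle_autopilot_3", true), ("toggle_engine_1", true),
   ("toggle_engine_2", true), ("toggle_engine_3", true), ("toggle_engine_4", true),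
   ("toggle_parking_brake", true)]

-- ===== PORT A =====
-- A's for-loop: return the state of the first action (in the length-sorted list) contained in
-- text_lower; f a = (a in text_lower)
def pvScan (f : String → Bool) : List (String × String) → Option String
  | [] => none
  | (a, s) :: rest => if f a then some s else pvScan f rest

def add_implicit_state (slots : List (String × String)) (original_text : String) (intent : String) : List (String × String) :=
  if (PySem.Dict.mk pvIntentMap).contains intent = false then slots
  else if (PySem.Dict.mk slots).contains "state" && !((PySem.Dict.mk slots).getD "state" "" == "") then slots
  else
    match pvScan (fun a => PySem.Str.isIn a (PySem.Str.lower original_text))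
            (PySem.List.sorted pvActionMap (fun x => PySem.Str.len x.1) true) with
    | some v => ((PySem.Dict.mk slots).insert "state" v).items
    | none => slots

-- ===== PORT B =====
def add_implicit_state_alt (slots : List (String × String)) (original_text : String) (intent : String) : List (String × String) :=
  if ((PySem.Dict.mk pvIntentMap).get? intent).getD false
      && ((PySem.Dict.mk slots).get? "state").getD "" == "" then
    let text_lower := PySem.Str.lower original_text
    let hits := pvActionMap.filter (fun p => PySem.Str.isIn p.1 text_lower)
    match PySem.List.max? hits (fun h => PySem.Str.len h.1) with
    | some h => ((PySem.Dict.mk slots).insert "state" h.2).items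
    | none => slots
  else slots

-- ===== PRECONDITION & SPEC =====
def Spec_add_implicit_state (slots : List (String × String)) (original_text : String) (intent : String) (out : List (String × String)) : Prop := out = add_implicit_state_alt slots original_text intent
instance (slots : List (String × String)) (original_text : String) (intent : String) (out : List (String × String)) : Decidable (Spec_add_implicit_state slots original_text intent out) := by unfold Spec_add_implicit_state; infer_instance

-- ===== CLAIM (what is proved, stated in full; the proofs are below) =====
def Claim_equal_add_implicit_state : Prop := ∀ (slots : List (String × String)) (original_text : String) (intent : String), Dom_add_implicit_state slots original_text intent → Spec_add_implicit_state slots original_text intent (add_implicit_state slots original_text intent)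

-- ===== LEMMAS AND PROOFS =====

-- guard bridges --------------------------------------------------------------

-- every value of IMPLICIT_STATE_INTENTS is True, so .get(intent) is truthy iff the key is present
lemma pv_intent_guard (intent : String) :
    ((PySem.Dict.mk pvIntentMap).get? intent).getD false =
      (PySem.Dict.mk pvIntentMap).contains intent := by
  simp only [pvIntentMap, PySem.Dict.get?_mk_cons, PySem.Dict.contains_mk]
  split_ifs <;> simp_all [PySem.Dict.get?]

-- `not slots.get('state')` is the negation of `'state' in slots and slots['state']`
lemma pv_state_guard (d : PySem.Dict String String) :
    (((d.get? "state").getD "" == "") : Bool) =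
      !(d.contains "state" && !(d.getD "state" "" == "")) := by
  rw [PySem.Dict.getD_eq_get?_getD, PySem.Dict.contains_eq_isSome_get?]
  cases d.get? "state" <;> simp

-- core: first hit over the stable descending sort = max-by-length over the filtered list -------

-- the stable descending sort of the literal map, as a literal
def pvSortedMap : List (String × String) :=
  [("deactivate", "off"), ("disengage", "off"), ("turn off", "off"), ("activate", "on"),
   ("retract", "up"), ("turn on", "on"), ("extend", "down"), ("engage", "on"),
   ("raise", "up"), ("lower", "down"), ("start", "on"), ("stow", "up"),
   ("stop", "off"), ("shut", "off")]

lemma pv_sorted_eq :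
    PySem.List.sorted pvActionMap (fun x => PySem.Str.len x.1) true = pvSortedMap := by rfl

-- A's scan with the 14 containment tests abstracted to booleans (insertion order:
-- raise, lower, retract, extend, stow, engage, disengage, turn on, turn off, start,
-- stop, shut, activate, deactivate)
def pvScanB (b1 b2 b3 b4 b5 b6 b7 b8 b9 b10 b11 b12 b13 b14 : Bool) : Option String :=
  if b14 then some "off" else if b7 then some "off" else if b9 then some "off" else if b13 then some "on"
  else if b3 then some "up" else if b8 then some "on" else if b4 then some "down" else if b6 then some "on"
  else if b1 then some "up" else if b2 then some "down" else if b10 then some "on" else if b5 then some "up"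
  else if b11 then some "off" else if b12 then some "off" else none

lemma pv_scan_bridge (f : String → Bool) :
    pvScan f pvSortedMap = pvScanB (f "raise") (f "lower") (f "retract") (f "extend") (f "stow")
      (f "engage") (f "disengage") (f "turn on") (f "turn off") (f "start") (f "stop") (f "shut")
      (f "activate") (f "deactivate") := by
  simp [pvScan, pvSortedMap, pvScanB]

-- B's filtered list with the same 14 tests abstracted
def pvHitsB (b1 b2 b3 b4 b5 b6 b7 b8 b9 b10 b11 b12 b13 b14 : Bool) : List (String × String) :=
  let t14 := if b14 then [("deactivate", "off")] else []
  let t13 := if b13 then ("activate", "on") :: t14 else t14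
  let t12 := if b12 then ("shut", "off") :: t13 else t13
  let t11 := if b11 then ("stop", "off") :: t12 else t12
  let t10 := if b10 then ("start", "on") :: t11 else t11
  let t9 := if b9 then ("turn off", "off") :: t10 else t10
  let t8 := if b8 then ("turn on", "on") :: t9 else t9
  let t7 := if b7 then ("disengage", "off") :: t8 else t8
  let t6 := if b6 then ("engage", "on") :: t7 else t7
  let t5 := if b5 then ("stow", "up") :: t6 else t6
  let t4 := if b4 then ("extend", "down") :: t5 else t5
  let t3 := if b3 then ("retract", "up") :: t4 else t4
  let t2 := if b2 then ("lower", "down") :: t3 else t3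
  if b1 then ("raise", "up") :: t2 else t2

lemma pv_filter_bridge (f : String → Bool) :
    pvActionMap.filter (fun p => f p.1) =
      pvHitsB (f "raise") (f "lower") (f "retract") (f "extend") (f "stow") (f "engage")
        (f "disengage") (f "turn on") (f "turn off") (f "start") (f "stop") (f "shut")
        (f "activate") (f "deactivate") := by
  simp only [pvActionMap, pvHitsB, List.filter_cons, List.filter_nil]

-- core fact, checked over all 2^14 match patterns
set_option maxHeartbeats 4000000 in
lemma pv_boolCore : ∀ (b1 b2 b3 b4 b5 b6 b7 b8 b9 b10 b11 b12 b13 b14 : Bool),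
    pvScanB b1 b2 b3 b4 b5 b6 b7 b8 b9 b10 b11 b12 b13 b14 =
      (PySem.List.max? (pvHitsB b1 b2 b3 b4 b5 b6 b7 b8 b9 b10 b11 b12 b13 b14)
        (fun h => PySem.Str.len h.1)).map Prod.snd := by
  decide

lemma pv_core (f : String → Bool) :
    pvScan f (PySem.List.sorted pvActionMap (fun x => PySem.Str.len x.1) true) =
      (PySem.List.max? (pvActionMap.filter (fun p => f p.1)) (fun h => PySem.Str.len h.1)).map
        Prod.snd := by
  rw [pv_sorted_eq, pv_scan_bridge, pv_filter_bridge]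
  exact pv_boolCore _ _ _ _ _ _ _ _ _ _ _ _ _ _

-- ===== VERDICT (by name: the statement is the Claim_ definition above) =====
theorem add_implicit_state_spec : Claim_equal_add_implicit_state := by
  intro slots original_text intent _
  unfold Spec_add_implicit_state add_implicit_state add_implicit_state_alt
  rw [pv_intent_guard, pv_state_guard]
  cases hI : (PySem.Dict.mk pvIntentMap).contains intent <;>
    cases hS : (PySem.Dict.mk slots).contains "state" &&
        !((PySem.Dict.mk slots).getD "state" "" == "") <;>
    simp only [Bool.not_false, Bool.not_true, Bool.and_false, Bool.and_true,
      if_true] <;>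
    try rfl
  rw [pv_core]
  cases PySem.List.max? (pvActionMap.filter
      (fun p => PySem.Str.isIn p.1 (PySem.Str.lower original_text)))
      (fun h => PySem.Str.len h.1) <;> rfl
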